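-- pv_equiv track=rewrite | github.com/jennyzzt/LLM_debate_on_ARC | ARC_gen_agents2_rounds2_openai/6c434453/agent1/algo.py | solve
-- ===== SOURCE A (Python) =====
-- def solve(input_grid):
--     rows, cols = len(input_grid), len(input_grid[0])
--     output_grid = [[cell for cell in row] for row in input_grid]  # Copy the input grid
--
--     # Helper function to check if a cell is part of a horizontal or vertical line of three or more '1's
--     def is_part_of_line(r, c):
--         # Check horizontal line
--         horizontal_count = 1
--         for delta in [-1, 1]:  # Check left and right
--             i = 1
--             while 0 <= c + delta * i < cols and input_grid[r][c + delta * i] == 1: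
--                 horizontal_count += 1
--                 i += 1
--         if horizontal_count >= 3:
--             return True
--
--         # Check vertical line
--         vertical_count = 1
--         for delta in [-1, 1]:  # Check up and down
--             i = 1
--             while 0 <= r + delta * i < rows and input_grid[r + delta * i][c] == 1:
--                 vertical_count += 1
--                 i += 1
--         if vertical_count >= 3:
--             return True
--
--         return False
--
--     # Apply the transformation rule
--     for r in range(rows):
--         for c in range(cols):
--             if input_grid[r][c] == 1 and is_part_of_line(r, c):
--                 output_grid[r][c] = 2
--
--     return output_grid
-- ===== SOURCE B (Python) =====
-- def solve(input_grid):
--     # Single pass per row and per column: mark whole runs of >= 3 ones at once.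
--     def run_marks(line):
--         marks = []
--         i = 0
--         n = len(line)
--         while i < n:
--             if line[i] == 1:
--                 j = i + 1
--                 while j < n and line[j] == 1:
--                     j += 1
--                 marks.extend([j - i >= 3] * (j - i))
--                 i = j
--             else:
--                 marks.append(False)
--                 i += 1
--         return marks
--
--     h = [run_marks(row) for row in input_grid]
--     v = [run_marks(list(col)) for col in zip(*input_grid)]
--     return [[2 if h[r][c] or v[c][r] else cell
--              for c, cell in enumerate(row)]
--             for r, row in enumerate(input_grid)]
-- ===== Notes on version B (the rewrite author's own statement) =====
-- stated objective: alternative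
-- what changed: Instead of re-scanning left/right/up/down from every cell (quadratic in run length on dense grids), B computes per-row and per-column run marks in single linear passes (runs of >=3 ones marked wholesale, columns via a transpose) and combines them per cell; same measured cost on the sampled inputs.
-- outside the precondition, e.g. on solve([[1], [1, 1, 1]]): A returns [[1], [1, 1, 1]], B returns [[1], [2, 2, 2]]
import Mathlib
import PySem

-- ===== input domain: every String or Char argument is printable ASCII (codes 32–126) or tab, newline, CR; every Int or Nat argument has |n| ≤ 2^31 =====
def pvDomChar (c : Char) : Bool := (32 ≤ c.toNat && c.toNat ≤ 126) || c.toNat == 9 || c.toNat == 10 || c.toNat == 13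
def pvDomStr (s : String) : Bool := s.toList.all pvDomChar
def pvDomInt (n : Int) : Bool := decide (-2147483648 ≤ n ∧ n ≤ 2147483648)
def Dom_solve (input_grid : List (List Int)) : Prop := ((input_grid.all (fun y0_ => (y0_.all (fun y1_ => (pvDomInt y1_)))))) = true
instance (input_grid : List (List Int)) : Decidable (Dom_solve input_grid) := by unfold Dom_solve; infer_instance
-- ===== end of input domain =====

-- B replaces A's per-cell four-direction rescans by one run-marking pass per row and per column (via a transpose): a different single-pass algorithm of similar measured cost.

-- ===== PORT A =====
-- the 'while 0 <= pos < n and f(pos) == 1' counting loop of is_part_of_line;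
-- fuel ≥ any possible iteration count makes it total (no algorithm change)
def cntF (f : Int → Int) (n : Nat) (δ : Int) : Int → Nat → Nat
  | _, 0 => 0
  | p, fuel+1 =>
    if 0 ≤ p + δ ∧ p + δ < (n : Int) ∧ f (p + δ) = 1 then cntF f n δ (p + δ) fuel + 1 else 0

def isPartOfLine (g : List (List Int)) (rows cols : Nat) (r c : Nat) : Bool :=
  let frow : Int → Int := fun q => (g.getD r []).getD q.toNat 0
  let hcount := 1 + cntF frow cols (-1) (c : Int) (cols+1) + cntF frow cols 1 (c : Int) (cols+1)
  if 3 ≤ hcount then true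
  else
    let fcol : Int → Int := fun q => (g.getD q.toNat []).getD c 0
    let vcount := 1 + cntF fcol rows (-1) (r : Int) (rows+1) + cntF fcol rows 1 (r : Int) (rows+1)
    decide (3 ≤ vcount)

def solve (input_grid : List (List Int)) : List (List Int) :=
  let rows := input_grid.length
  let cols := (input_grid.headD []).length
  (PySem.List.enumerate input_grid).map (fun p =>
    (PySem.List.enumerate p.2).map (fun q =>
      if q.1 < (cols : Int) ∧ q.2 = 1 ∧ isPartOfLine input_grid rows cols p.1.toNat q.1.toNat = true
      then 2 else q.2))

-- ===== PORT B =====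
-- length of the leading run of 1s (the inner 'while j < n and line[j] == 1' scan)
def onesPrefix : List Int → Nat
  | [] => 0
  | x :: xs => if x = 1 then onesPrefix xs + 1 else 0

-- run_marks: split the line into maximal runs, mark whole runs of length ≥ 3
def runMarks : List Int → List Bool
  | [] => []
  | x :: xs =>
    if x = 1 then
      List.replicate (onesPrefix xs + 1) (decide (3 ≤ onesPrefix xs + 1)) ++ runMarks (xs.drop (onesPrefix xs))
    else false :: runMarks xs
termination_by l => l.length
decreasing_by all_goals (simp only [List.length_drop, List.length_cons]; omega)

-- zip(*input_grid): truncating transpose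
def zipT (g : List (List Int)) : List (List Int) :=
  if h : g = [] ∨ g.any (·.isEmpty) then [] else
    g.map (·.headD 0) :: zipT (g.map List.tail)
termination_by (g.headD []).length
decreasing_by
  simp only [not_or, List.any_eq_true, not_exists, not_and] at h
  obtain ⟨h1, h2⟩ := h
  match g, h1 with
  | r :: g', _ =>
    have hr : ¬ r.isEmpty = true := h2 r List.mem_cons_self
    cases r with
    | nil => simp at hr
    | cons a as => simp

def solve_alt (input_grid : List (List Int)) : List (List Int) :=
  let h := input_grid.map runMarks
  let v := (zipT input_grid).map runMarks
  (PySem.List.enumerate input_grid).map (fun p =>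
    (PySem.List.enumerate p.2).map (fun q =>
      if (h.getD p.1.toNat []).getD q.1.toNat false || (v.getD q.1.toNat []).getD p.1.toNat false
      then 2 else q.2))

-- ===== PRECONDITION & SPEC =====
-- Pre_ excludes the empty grid (A raises IndexError on len(input_grid[0])) and ragged grids:
-- with a row shorter than row 0 A raises IndexError, and with rows longer than row 0 A only
-- scans row 0's width while B's transpose-based pass raises IndexError.
def Pre_solve (input_grid : List (List Int)) : Prop :=
  input_grid ≠ [] ∧ ∀ row ∈ input_grid, row.length = (input_grid.headD []).length
instance (input_grid : List (List Int)) : Decidable (Pre_solve input_grid) := by unfold Pre_solve; infer_instance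

def pvWitness_solve : List (List Int) := [[1, 1, 1], [0, 1, 0]]

def Spec_solve (input_grid : List (List Int)) (out : List (List Int)) : Prop := out = solve_alt input_grid
instance (input_grid : List (List Int)) (out : List (List Int)) : Decidable (Spec_solve input_grid out) := by unfold Spec_solve; infer_instance

-- ===== CLAIM (what is proved, stated in full; the proofs are below) =====
def Claim_equal_solve : Prop := ∀ (input_grid : List (List Int)), Dom_solve input_grid → Pre_solve input_grid → Spec_solve input_grid (solve input_grid)

-- ===== LEMMAS AND PROOFS =====

theorem onesPrefix_append (a b : List Int) :
    onesPrefix (a ++ b) = if onesPrefix a = a.length then a.length + onesPrefix b else onesPrefix a := by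
  induction a with
  | nil => simp [onesPrefix]
  | cons x xs ih =>
    by_cases hx : x = 1
    · simp only [List.cons_append, onesPrefix, hx, ih, List.length_cons]
      split_ifs with h1 h2 h3 <;> omega
    · simp [onesPrefix, hx]

theorem onesPrefix_eq_length_iff (l : List Int) : onesPrefix l = l.length ↔ ∀ x ∈ l, x = 1 := by
  induction l with
  | nil => simp [onesPrefix]
  | cons x xs ih =>
    by_cases hx : x = 1
    · simp [onesPrefix, hx, ih]
    · simp [onesPrefix, hx]

theorem onesPrefix_replicate (n : Nat) : onesPrefix (List.replicate n 1) = n := by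
  induction n with
  | zero => simp [onesPrefix]
  | succ n ih => simp [List.replicate_succ, onesPrefix, ih]

theorem onesPrefix_take (l : List Int) : l.take (onesPrefix l) = List.replicate (onesPrefix l) 1 := by
  induction l with
  | nil => simp [onesPrefix]
  | cons x xs ih =>
    by_cases hx : x = 1
    · simp [onesPrefix, hx, List.replicate_succ, ih]
    · simp [onesPrefix, hx]

theorem onesPrefix_drop (l : List Int) : onesPrefix (l.drop (onesPrefix l)) = 0 := by
  induction l with
  | nil => simp [onesPrefix]
  | cons x xs ih =>
    by_cases hx : x = 1
    · simpa [onesPrefix, hx] using ih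
    · simp [onesPrefix, hx]

theorem marks_spec : ∀ (n : Nat) (l : List Int), l.length ≤ n → ∀ (c : Nat), c < l.length →
    (runMarks l).getD c false =
      decide (l.getD c 0 = 1 ∧ 3 ≤ 1 + onesPrefix ((l.take c).reverse) + onesPrefix (l.drop (c+1))) := by
  intro n
  induction n with
  | zero => intro l hl c hc; omega
  | succ n ih =>
    intro l hl c hc
    match l with
    | x :: xs =>
      by_cases hx : x = 1
      · obtain ⟨m, hm⟩ : ∃ m, onesPrefix xs = m := ⟨_, rfl⟩
        obtain ⟨rest, hrest⟩ : ∃ r, xs.drop m = r := ⟨_, rfl⟩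
        have hxs : xs = List.replicate m 1 ++ rest := by
          rw [← hrest, ← hm]
          conv_lhs => rw [← List.take_append_drop (onesPrefix xs) xs]
          rw [onesPrefix_take]
        have hrZ : onesPrefix rest = 0 := by
          rw [← hrest, ← hm]; exact onesPrefix_drop xs
        have hl2 : x :: xs = List.replicate (m+1) 1 ++ rest := by
          rw [hx, List.replicate_succ]; simpa using hxs
        have hrun : runMarks (x :: xs)
            = List.replicate (m+1) (decide (3 ≤ m+1)) ++ runMarks rest := by
          rw [runMarks, if_pos hx, hm, hrest]
        have hlen : xs.length = m + rest.length := by rw [hxs]; simp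
        rw [hrun, hl2]
        by_cases hck : c < m + 1
        · -- inside the run
          have h1 : (List.replicate (m+1) (decide (3 ≤ m+1)) ++ runMarks rest).getD c false
              = decide (3 ≤ m+1) := by
            rw [List.getD_append _ _ _ _ (by simpa using hck), List.getD_eq_getElem _ _ (by simpa using hck)]
            simp
          have h2 : (List.replicate (m+1) (1:Int) ++ rest).getD c 0 = 1 := by
            rw [List.getD_append _ _ _ _ (by simpa using hck), List.getD_eq_getElem _ _ (by simpa using hck)]
            simp
          have h3 : (List.replicate (m+1) (1:Int) ++ rest).take c = List.replicate c 1 := by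
            rw [List.take_append_of_le_length (by simpa using Nat.le_of_lt hck), List.take_replicate]
            congr 1; omega
          have h4 : (List.replicate (m+1) (1:Int) ++ rest).drop (c+1)
              = List.replicate (m+1-(c+1)) 1 ++ rest := by
            rw [List.drop_append_of_le_length (by simpa using hck), List.drop_replicate]
          rw [h1, h2, h3, h4, List.reverse_replicate, onesPrefix_replicate,
            onesPrefix_append, onesPrefix_replicate, List.length_replicate, if_pos rfl, hrZ,
            decide_eq_decide]
          omega
        · -- past the run: index into rest
          have hck' : m + 1 ≤ c := by omega
          have hcr : c - (m+1) < rest.length := by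
            simp only [List.length_cons] at hc; omega
          have hrne : rest ≠ [] := by
            intro h; rw [h] at hcr; simp at hcr
          have hr0 : rest.getD 0 0 ≠ 1 := by
            intro h
            match rest, hrne with
            | y :: ys, _ =>
              simp only [List.getD_cons_zero] at h
              rw [onesPrefix, if_pos h] at hrZ; omega
          have h1 : (List.replicate (m+1) (decide (3 ≤ m+1)) ++ runMarks rest).getD c false
              = (runMarks rest).getD (c - (m+1)) false := by
            rw [List.getD_append_right _ _ _ _ (by simpa using hck')]
            simp
          have h2 : (List.replicate (m+1) (1:Int) ++ rest).getD c 0 = rest.getD (c - (m+1)) 0 := by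
            rw [List.getD_append_right _ _ _ _ (by simpa using hck')]
            simp
          have h4 : (List.replicate (m+1) (1:Int) ++ rest).drop (c+1) = rest.drop (c - (m+1) + 1) := by
            rw [List.drop_append, List.drop_eq_nil_of_le (by simp; omega)]
            simp only [List.nil_append, List.length_replicate]
            congr 1; omega
          have h3 : ((List.replicate (m+1) (1:Int) ++ rest).take c).reverse
              = (rest.take (c - (m+1))).reverse ++ List.replicate (m+1) 1 := by
            rw [List.take_append, List.take_of_length_le (by simp; omega), List.reverse_append,
              List.reverse_replicate]
            simp only [List.length_replicate]
          have hrestlen : rest.length ≤ n := by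
            simp only [List.length_cons] at hl
            omega
          rw [h1, h2, h3, h4, ih rest hrestlen (c - (m+1)) hcr, onesPrefix_append]
          by_cases hck2 : c = m + 1
          · subst hck2
            rw [decide_eq_decide]
            constructor
            · rintro ⟨h, -⟩; exact absurd (by simpa using h) hr0
            · rintro ⟨h, -⟩; exact absurd (by simpa using h) hr0
          · have hmem : rest.getD 0 0 ∈ (rest.take (c - (m+1))).reverse := by
              rw [List.mem_reverse]
              have h0 : 0 < (rest.take (c - (m+1))).length := by
                simp only [List.length_take]
                omega
              have he : (rest.take (c - (m+1)))[0]'h0 = rest[0]'(by omega) := List.getElem_take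
              rw [List.getD_eq_getElem _ _ (by omega), ← he]
              exact List.getElem_mem h0
            have hne : ¬ onesPrefix ((rest.take (c - (m+1))).reverse)
                = ((rest.take (c - (m+1))).reverse).length := by
              rw [onesPrefix_eq_length_iff]
              intro hall
              exact hr0 (hall _ hmem)
            rw [if_neg hne]
      · -- x ≠ 1 : runMarks is false :: runMarks xs
        have hrun : runMarks (x :: xs) = false :: runMarks xs := by
          rw [runMarks, if_neg hx]
        match c with
        | 0 => simp [hrun, hx]
        | c'+1 =>
          have hc' : c' < xs.length := by simpa using hc
          have hxl : xs.length ≤ n := by simpa using hl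
          rw [hrun, List.getD_cons_succ, List.getD_cons_succ, List.drop_succ_cons,
            List.take_succ_cons, List.reverse_cons, onesPrefix_append,
            ih xs hxl c' hc']
          have hx0 : onesPrefix [x] = 0 := by simp [onesPrefix, hx]
          rw [hx0]
          split_ifs with h
          · rw [← h, decide_eq_decide]
            omega
          · rfl
    | [] => simp at hc

theorem cnt_right (l : List Int) : ∀ (fuel c : Nat), l.length ≤ c + fuel →
    cntF (fun q => l.getD q.toNat 0) l.length 1 (c : Int) fuel = onesPrefix (l.drop (c+1)) := by
  intro fuel
  induction fuel with
  | zero =>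
    intro c hc
    have hd : l.drop (c+1) = [] := List.drop_eq_nil_of_le (by omega)
    simp [cntF, hd, onesPrefix]
  | succ fuel ih =>
    intro c hc
    have hcast : (c : Int) + 1 = ((c + 1 : Nat) : Int) := by push_cast; ring
    by_cases h1 : c + 1 < l.length
    · have hd : l.drop (c+1) = l[c+1] :: l.drop (c+2) := List.drop_eq_getElem_cons h1
      have hget : l.getD ((c : Int) + 1).toNat 0 = l[c+1] := by
        rw [hcast, Int.toNat_natCast]; exact List.getD_eq_getElem l 0 h1
      by_cases h2 : l[c+1] = 1
      · have : cntF (fun q => l.getD q.toNat 0) l.length 1 (c : Int) (fuel+1)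
            = cntF (fun q => l.getD q.toNat 0) l.length 1 ((c:Int)+1) fuel + 1 := by
          simp only [cntF]
          rw [if_pos]
          exact ⟨by omega, by exact_mod_cast (by omega : (c:Int)+1 < (l.length:Int)), by rw [hget]; exact h2⟩
        rw [this, hcast, ih (c+1) (by omega), hd]
        simp [onesPrefix, h2]
      · simp only [cntF]
        rw [if_neg, hd]
        · simp [onesPrefix, h2]
        · rintro ⟨-, -, hf⟩; rw [hget] at hf; exact h2 hf
    · have hd : l.drop (c+1) = [] := List.drop_eq_nil_of_le (by omega)
      simp only [cntF]
      rw [if_neg, hd]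
      · rfl
      · rintro ⟨-, hlt, -⟩; omega

theorem cnt_left (l : List Int) : ∀ (c fuel : Nat), c ≤ fuel → c ≤ l.length →
    cntF (fun q => l.getD q.toNat 0) l.length (-1) (c : Int) fuel = onesPrefix ((l.take c).reverse) := by
  intro c
  induction c with
  | zero =>
    intro fuel _ _
    cases fuel with
    | zero => simp [cntF, onesPrefix]
    | succ f =>
      simp only [cntF]
      rw [if_neg]
      · simp [onesPrefix]
      · rintro ⟨h0, -, -⟩; omega
  | succ c' ih =>
    intro fuel hf hl
    match fuel, hf with
    | f'+1, _ =>
      have hcast : ((c' + 1 : Nat) : Int) + (-1) = (c' : Int) := by push_cast; ring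
      have hc' : c' < l.length := by omega
      have hget : l.getD ((c' : Int)).toNat 0 = l[c'] := by
        rw [Int.toNat_natCast]; exact List.getD_eq_getElem l 0 hc'
      have htake : (l.take (c'+1)).reverse = l[c'] :: (l.take c').reverse := by
        rw [List.take_add_one]
        simp [List.getElem?_eq_getElem hc']
      by_cases h2 : l[c'] = 1
      · have : cntF (fun q => l.getD q.toNat 0) l.length (-1) ((c'+1 : Nat) : Int) (f'+1)
            = cntF (fun q => l.getD q.toNat 0) l.length (-1) ((c' : Nat) : Int) f' + 1 := by
          simp only [cntF]
          rw [hcast, if_pos]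
          exact ⟨by omega, by exact_mod_cast (by omega : (c':Int) < (l.length:Int)), by rw [hget]; exact h2⟩
        rw [this, ih f' (by omega) (by omega), htake]
        simp [onesPrefix, h2]
      · simp only [cntF]
        rw [hcast, if_neg, htake]
        · simp [onesPrefix, h2]
        · rintro ⟨-, -, hf1⟩; rw [hget] at hf1; exact h2 hf1

theorem getD_tail (row : List Int) (c : Nat) : row.tail.getD c 0 = row.getD (c+1) 0 := by
  cases row <;> rfl

theorem zipT_spec : ∀ (w : Nat) (g : List (List Int)), g ≠ [] → (∀ row ∈ g, row.length = w) →
    zipT g = (List.range w).map (fun c => g.map (fun row => row.getD c 0)) := by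
  intro w
  induction w with
  | zero =>
    intro g hne hw
    rw [zipT, dif_pos, List.range_zero, List.map_nil]
    right
    refine List.any_eq_true.mpr ⟨g.head hne, List.head_mem hne, ?_⟩
    simp only [List.isEmpty_iff]
    exact List.length_eq_zero_iff.mp (hw _ (List.head_mem hne))
  | succ w ih =>
    intro g hne hw
    have hcond : ¬ (g = [] ∨ g.any (·.isEmpty) = true) := by
      rintro (h | h)
      · exact hne h
      · obtain ⟨row, hm, hrow⟩ := List.any_eq_true.mp h
        have := hw row hm
        rw [List.isEmpty_iff] at hrow
        rw [hrow] at this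
        simp at this
    rw [zipT, dif_neg hcond, List.range_succ_eq_map, List.map_cons]
    congr 1
    · apply List.map_congr_left
      intro row _
      cases row <;> rfl
    · rw [ih (g.map List.tail) (by simpa using hne)
        (by
          intro row hm
          obtain ⟨r0, hr0, hr0t⟩ := List.mem_map.mp hm
          have := hw r0 hr0
          rw [← hr0t, List.length_tail]
          omega),
        List.map_map]
      apply List.map_congr_left
      intro c _
      simp only [Function.comp, List.map_map]
      apply List.map_congr_left
      intro row _
      simp only [Function.comp]
      exact getD_tail row c

theorem getD_map_getD (g : List (List Int)) (c : Nat) (i : Nat) :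
    (g.map (fun row => row.getD c 0)).getD i 0 = (g.getD i []).getD c 0 := by
  induction g generalizing i with
  | nil => simp
  | cons r g' ih =>
    cases i with
    | zero => rfl
    | succ n => simp only [List.map_cons, List.getD_cons_succ]; exact ih n

theorem cell_eq (g : List (List Int)) (hpre : Pre_solve g) (k j : Nat)
    (hk : k < g.length) (hj : j < (g[k]'hk).length) :
    (if (j : Int) < (((g.headD []).length : Nat) : Int) ∧ (g[k]'hk)[j]'hj = 1
        ∧ isPartOfLine g g.length (g.headD []).length k j = true
     then (2:Int) else (g[k]'hk)[j]'hj)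
    = (if ((g.map runMarks).getD k []).getD j false
          || (((zipT g).map runMarks).getD j []).getD k false
       then 2 else (g[k]'hk)[j]'hj) := by
  obtain ⟨hne, hrect⟩ := hpre
  have hw : (g[k]'hk).length = (g.headD []).length := hrect _ (List.getElem_mem hk)
  have hjw : j < (g.headD []).length := hw ▸ hj
  have hcell : (g[k]'hk).getD j 0 = (g[k]'hk)[j]'hj := List.getD_eq_getElem _ _ hj
  -- the column as a list
  have hcol : ∀ (i : Nat), (g.map (fun row => row.getD j 0)).getD i 0 = (g.getD i []).getD j 0 :=
    fun i => getD_map_getD g j i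
  have hcolk : (g.map (fun row => row.getD j 0)).getD k 0 = (g[k]'hk)[j]'hj := by
    rw [hcol k, List.getD_eq_getElem _ _ hk, hcell]
  have hcollen : (g.map (fun row => row.getD j 0)).length = g.length := by simp
  -- horizontal marks = runMarks of the row
  have hH : ((g.map runMarks).getD k []).getD j false
      = decide ((g[k]'hk)[j]'hj = 1
          ∧ 3 ≤ 1 + onesPrefix (((g[k]'hk).take j).reverse) + onesPrefix ((g[k]'hk).drop (j+1))) := by
    rw [List.getD_eq_getElem (g.map runMarks) [] (by simpa using hk), List.getElem_map,
      marks_spec (g[k]'hk).length _ le_rfl j hj, hcell]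
  -- vertical marks = runMarks of the column
  have hV : (((zipT g).map runMarks).getD j []).getD k false
      = decide ((g[k]'hk)[j]'hj = 1
          ∧ 3 ≤ 1 + onesPrefix (((g.map (fun row => row.getD j 0)).take k).reverse)
                + onesPrefix ((g.map (fun row => row.getD j 0)).drop (k+1))) := by
    rw [zipT_spec (g.headD []).length g hne hrect]
    have hjlen : j < (((List.range (g.headD []).length).map
        (fun c => g.map (fun row => row.getD c 0))).map runMarks).length := by
      simpa only [List.length_map, List.length_range] using hjw
    rw [List.getD_eq_getElem _ _ hjlen, List.getElem_map, List.getElem_map, List.getElem_range,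
      marks_spec (g.map (fun row => row.getD j 0)).length _ le_rfl k (by simpa using hk), hcolk]
  -- A's is_part_of_line in terms of the same run lengths
  have hfrow : (fun q : Int => (g.getD k []).getD q.toNat 0)
      = (fun q : Int => (g[k]'hk).getD q.toNat 0) := by
    funext q; rw [List.getD_eq_getElem _ _ hk]
  have hfcol : (fun q : Int => (g.getD q.toNat []).getD j 0)
      = (fun q : Int => (g.map (fun row => row.getD j 0)).getD q.toNat 0) := by
    funext q; rw [hcol]
  have hA : isPartOfLine g g.length (g.headD []).length k j
      = (if 3 ≤ 1 + onesPrefix (((g[k]'hk).take j).reverse) + onesPrefix ((g[k]'hk).drop (j+1))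
         then true
         else decide (3 ≤ 1 + onesPrefix (((g.map (fun row => row.getD j 0)).take k).reverse)
                + onesPrefix ((g.map (fun row => row.getD j 0)).drop (k+1)))) := by
    unfold isPartOfLine
    dsimp only
    rw [hfrow, hfcol, ← hw]
    rw [cnt_left (g[k]'hk) j ((g[k]'hk).length + 1) (by omega) (by omega),
      cnt_right (g[k]'hk) ((g[k]'hk).length + 1) j (by omega)]
    have hglen : g.length = (g.map (fun row => row.getD j 0)).length := hcollen.symm
    rw [hglen,
      cnt_left (g.map (fun row => row.getD j 0)) k ((g.map (fun row => row.getD j 0)).length + 1)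
        (by omega) (by rw [hcollen]; omega),
      cnt_right (g.map (fun row => row.getD j 0)) ((g.map (fun row => row.getD j 0)).length + 1) k
        (by omega)]
  -- case analysis
  have hjInt : j < (g.head?.getD []).length := by
    cases g with
    | nil => exact absurd rfl hne
    | cons a l => simpa using hjw
  rw [hH, hV, hA]
  by_cases hc1 : (g[k]'hk)[j]'hj = 1
  · by_cases h3 : 3 ≤ 1 + onesPrefix (((g[k]'hk).take j).reverse) + onesPrefix ((g[k]'hk).drop (j+1))
    · simp [hjInt, hc1, h3]
    · by_cases h4 : 3 ≤ 1 + onesPrefix (((g.map (fun row => row.getD j 0)).take k).reverse)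
                + onesPrefix ((g.map (fun row => row.getD j 0)).drop (k+1))
      · simp [hjInt, hc1, h3]
      · simp [hjInt, hc1, h3]
  · simp [hc1]

theorem solve_spec' : ∀ (input_grid : List (List Int)), Pre_solve input_grid →
    solve input_grid = solve_alt input_grid := by
  intro g hpre
  unfold solve solve_alt
  apply List.map_congr_left
  intro p hp
  rw [PySem.List.mem_enumerate_iff] at hp
  obtain ⟨k, hk, rfl⟩ := hp
  apply List.map_congr_left
  intro q hq
  rw [PySem.List.mem_enumerate_iff] at hq
  obtain ⟨j, hj, rfl⟩ := hq
  simp only [zero_add, Int.toNat_natCast]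
  exact cell_eq g hpre k j hk hj

-- ===== VERDICT (by name: the statement is the Claim_ definition above) =====
theorem solve_spec : Claim_equal_solve := by
  intro g _ hpre
  unfold Spec_solve
  exact solve_spec' g hpre
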